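-- pv_equiv track=rewrite | github.com/YueZhang-studyuse/CBSH2-RTC | mcp/mcp.py | preprocess_orders
-- ===== SOURCE A (Python) =====
-- def preprocess_orders(scen_path):
--     loc_order = {}
--     max_line = 0
--     for path in scen_path:
--         if (len(path)>max_line):
--             max_line = len(path)
--     for i in range(max_line):
--         for agent in range(len(scen_path)):
--             if (i >= len(scen_path[agent])):
--                 continue
--             temp = str(scen_path[agent][i][0])+","+str(scen_path[agent][i][1])
--             if temp in loc_order.keys():
--                 #skip an wait action
--                 if i > 0 and scen_path[agent][i-1][0] == scen_path[agent][i][0] and scen_path[agent][i-1][1] == scen_path[agent][i][1]: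
--                     continue
--                 loc_order[temp].append(agent)
--             else:
--                 loc_order[temp] = [agent]
--     return loc_order
-- ===== SOURCE B (Python) =====
-- def preprocess_orders(scen_path):
--     n = len(scen_path)
--     records = []
--     for agent, path in enumerate(scen_path):
--         for i, cell in enumerate(path):
--             if i == 0 or path[i - 1] != cell:
--                 records.append((i, agent, str(cell[0]) + "," + str(cell[1])))
--     # (time, agent) order as a single integer key: agent < n, so i*n+agent is lexicographic
--     records.sort(key=lambda r: r[0] * n + r[1])
--     loc_order = {}
--     for _, agent, key in records:
--         if key in loc_order:
--             loc_order[key].append(agent)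
--         else:
--             loc_order[key] = [agent]
--     return loc_order
-- ===== Notes on version B (the rewrite author's own statement) =====
-- stated objective: alternative
-- what changed: Replaces A's time-major double loop with interleaved dict-membership wait checks by an agent-major record-building pass (wait cells dropped per agent), one stable sort on a (time,agent) key, and a final grouping pass over the sorted records.
import Mathlib
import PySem

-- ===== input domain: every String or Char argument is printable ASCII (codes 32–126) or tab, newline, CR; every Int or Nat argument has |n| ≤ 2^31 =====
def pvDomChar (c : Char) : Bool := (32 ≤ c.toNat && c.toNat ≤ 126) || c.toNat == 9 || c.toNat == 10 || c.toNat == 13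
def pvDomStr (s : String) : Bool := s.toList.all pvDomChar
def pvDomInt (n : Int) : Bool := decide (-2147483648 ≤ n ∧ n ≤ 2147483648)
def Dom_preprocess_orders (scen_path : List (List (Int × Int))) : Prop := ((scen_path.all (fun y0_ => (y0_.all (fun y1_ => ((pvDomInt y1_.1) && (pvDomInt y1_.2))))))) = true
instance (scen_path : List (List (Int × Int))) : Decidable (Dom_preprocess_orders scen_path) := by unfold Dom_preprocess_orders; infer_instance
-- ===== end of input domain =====

-- B replaces A's time-major double loop (with its dict-membership wait test) by an agent-major
-- record-building pass, one sort on a (time, agent) key, and a grouping pass; same return value.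

-- shared helper: temp = str(x) + "," + str(y)  (both Python versions build this same string)
def pvKey (c : Int × Int) : String := PySem.Int.toStr c.1 ++ "," ++ PySem.Int.toStr c.2

-- ===== PORT A =====
def preprocess_orders (scen_path : List (List (Int × Int))) : List (String × List Int) :=
  let max_line : Int := scen_path.foldl (fun m path => if (path.length : Int) > m then (path.length : Int) else m) 0
  let loc_order : PySem.Dict String (List Int) :=
    (PySem.List.pyRange 0 max_line 1).foldl (fun loc i =>
      (PySem.List.pyRange 0 (scen_path.length : Int) 1).foldl (fun loc agent =>
        match PySem.List.pyGet? scen_path agent with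
        | none => loc  -- unreachable (agent in range); IndexError otherwise
        | some path =>
          if (path.length : Int) ≤ i then loc   -- 'continue'
          else match PySem.List.pyGet? path i with
            | none => loc  -- unreachable (i < len path)
            | some cell =>
              let temp := pvKey cell
              match loc.get? temp with
              | some lst =>
                -- 'i > 0 and prev[0] == cell[0] and prev[1] == cell[1]' (pair equality = both components)
                if 0 < i ∧ PySem.List.pyGet? path (i - 1) = some cell then loc
                else loc.insert temp (lst ++ [agent])
              | none => loc.insert temp [agent]) loc) PySem.Dict.empty
  loc_order.items

-- ===== PORT B =====
def preprocess_orders_alt (scen_path : List (List (Int × Int))) : List (String × List Int) :=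
  let n : Int := scen_path.length
  let records : List (Int × Int × String) :=
    (PySem.List.enumerate scen_path).foldl (fun recs ap =>
      (PySem.List.enumerate ap.2).foldl (fun recs ic =>
        if ic.1 = 0 ∨ PySem.List.pyGet? ap.2 (ic.1 - 1) ≠ some ic.2 then
          recs ++ [(ic.1, ap.1, pvKey ic.2)]
        else recs) recs) []
  let sortedRecs := PySem.List.sorted records (fun r => r.1 * n + r.2.1)
  let loc_order : PySem.Dict String (List Int) :=
    sortedRecs.foldl (fun loc r =>
      match loc.get? r.2.2 with
      | some lst => loc.insert r.2.2 (lst ++ [r.2.1])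
      | none => loc.insert r.2.2 [r.2.1]) PySem.Dict.empty
  loc_order.items

-- ===== PRECONDITION & SPEC =====
def Spec_preprocess_orders (scen_path : List (List (Int × Int))) (out : List (String × List Int)) : Prop := out = preprocess_orders_alt scen_path
instance (scen_path : List (List (Int × Int))) (out : List (String × List Int)) : Decidable (Spec_preprocess_orders scen_path out) := by unfold Spec_preprocess_orders; infer_instance

-- ===== CLAIM (what is proved, stated in full; the proofs are below) =====
def Claim_equal_preprocess_orders : Prop := ∀ (scen_path : List (List (Int × Int))), Dom_preprocess_orders scen_path → Spec_preprocess_orders scen_path (preprocess_orders scen_path)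

-- ===== LEMMAS AND PROOFS =====

-- the common grouping step (B's final loop body; A's loop body reduces to it on non-wait cells)
def pvStep (loc : PySem.Dict String (List Int)) (r : Int × Int × String) : PySem.Dict String (List Int) :=
  match loc.get? r.2.2 with
  | some lst => loc.insert r.2.2 (lst ++ [r.2.1])
  | none => loc.insert r.2.2 [r.2.1]

-- the record an agent's path emits at time i (none: out of range, or a wait)
def pvRecP (path : List (Int × Int)) (aI : Int) (i : Nat) : Option (Int × Int × String) :=
  match path[i]? with
  | some cell => if i = 0 ∨ path[i-1]? ≠ some cell then some ((i : Int), aI, pvKey cell) else none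
  | none => none

def pvRec (s : List (List (Int × Int))) (i a : Nat) : Option (Int × Int × String) :=
  match s[a]? with
  | some path => pvRecP path (a : Int) i
  | none => none

-- all records in time-major order / agent-major order
def pvTM (s : List (List (Int × Int))) (m : Nat) : List (Int × Int × String) :=
  (List.range m).flatMap (fun i => (List.range s.length).filterMap (fun a => pvRec s i a))

def pvAM (s : List (List (Int × Int))) (m : Nat) : List (Int × Int × String) :=
  (List.range s.length).flatMap (fun a => (List.range m).filterMap (fun i => pvRec s i a))

def pvMax (s : List (List (Int × Int))) : Nat := s.foldl (fun m p => max m p.length) 0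

lemma pvMax_cast (s : List (List (Int × Int))) (acc : Nat) :
    s.foldl (fun m path => if (path.length : Int) > m then (path.length : Int) else m) (acc : Int)
      = ((s.foldl (fun m p => max m p.length) acc : Nat) : Int) := by
  induction s generalizing acc with
  | nil => rfl
  | cons p t ih =>
    simp only [List.foldl_cons]
    by_cases h : p.length ≤ acc
    · rw [if_neg (by exact_mod_cast not_lt.2 h), Nat.max_eq_left h, ih]
    · rw [if_pos (by exact_mod_cast Nat.lt_of_not_le h), Nat.max_eq_right (Nat.le_of_not_le h), ih]

lemma pvMax_le (s : List (List (Int × Int))) (p : List (Int × Int)) (hp : p ∈ s) :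
    p.length ≤ pvMax s :=
  (PySem.List.le_foldl_max_nat s (fun p => p.length) 0).2 p hp

lemma pvRec_fields {s : List (List (Int × Int))} {i a : Nat} {r : Int × Int × String}
    (h : pvRec s i a = some r) : r.1 = (i : Int) ∧ r.2.1 = (a : Int) := by
  unfold pvRec pvRecP at h
  cases hs : s[a]? with
  | none => simp [hs] at h
  | some path =>
    simp only [hs] at h
    cases hp : path[i]? with
    | none => simp [hp] at h
    | some cell =>
      simp only [hp] at h
      by_cases hc : i = 0 ∨ path[i-1]? ≠ some cell
      · rw [if_pos hc] at h; cases h; exact ⟨rfl, rfl⟩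
      · rw [if_neg hc] at h; cases h

-- ===== A-side: the nested fold groups exactly the time-major records =====

lemma pvMax_cast' (s : List (List (Int × Int))) :
    s.foldl (fun m path => if (path.length : Int) > m then (path.length : Int) else m) 0
      = ((pvMax s : Nat) : Int) := by
  unfold pvMax
  simpa using pvMax_cast s 0

def pvA1 (s : List (List (Int × Int))) (i : Nat) (loc : PySem.Dict String (List Int)) (a : Nat) :
    PySem.Dict String (List Int) :=
  match PySem.List.pyGet? s (a : Int) with
  | none => loc
  | some path =>
    if (path.length : Int) ≤ (i : Int) then loc
    else match PySem.List.pyGet? path (i : Int) with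
      | none => loc
      | some cell =>
        match loc.get? (pvKey cell) with
        | some lst =>
          if 0 < (i : Int) ∧ PySem.List.pyGet? path ((i : Int) - 1) = some cell then loc
          else loc.insert (pvKey cell) (lst ++ [(a : Int)])
        | none => loc.insert (pvKey cell) [(a : Int)]

def pvInv (s : List (List (Int × Int))) (i : Nat) (loc : PySem.Dict String (List Int)) : Prop :=
  ∀ (a j : Nat) (path : List (Int × Int)) (cell : Int × Int), j < i → s[a]? = some path →
    path[j]? = some cell → loc.contains (pvKey cell) = true

lemma stepA (s : List (List (Int × Int))) (i a : Nat) (loc : PySem.Dict String (List Int))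
    (hInv : pvInv s i loc) :
    (pvA1 s i loc a = (match pvRec s i a with
        | some r => pvStep loc r
        | none => loc))
    ∧ (∀ k, loc.contains k = true → (pvA1 s i loc a).contains k = true)
    ∧ (∀ path cell, s[a]? = some path → path[i]? = some cell →
        (pvA1 s i loc a).contains (pvKey cell) = true) := by
  unfold pvA1 pvRec pvRecP
  rw [PySem.List.pyGet?_natCast]
  cases hs : s[a]? with
  | none => exact ⟨rfl, fun k h => h, fun path cell h _ => by cases h⟩
  | some path =>
    simp only
    by_cases hlen : i < path.length
    · rw [if_neg (by exact_mod_cast not_le.mpr hlen)]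
      have hcell : path[i]? = some path[i] := List.getElem?_eq_getElem hlen
      rw [PySem.List.pyGet?_natCast, hcell]
      simp only
      by_cases hw : 0 < i ∧ path[i-1]? = some path[i]
      · -- wait step: dict already contains the key, A skips; the record list skips too
        have hInt : 0 < (i : Int) ∧ PySem.List.pyGet? path ((i : Int) - 1) = some path[i] := by
          refine ⟨by exact_mod_cast hw.1, ?_⟩
          rw [show (i : Int) - 1 = ((i - 1 : Nat) : Int) by omega, PySem.List.pyGet?_natCast]
          exact hw.2
        have hc : loc.contains (pvKey path[i]) = true :=
          hInv a (i-1) path path[i] (by omega) hs hw.2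
        obtain ⟨lst, hl⟩ : ∃ lst, loc.get? (pvKey path[i]) = some lst := by
          rw [PySem.Dict.contains_eq_isSome_get?] at hc
          exact Option.isSome_iff_exists.mp hc
        rw [hl]
        simp only [if_pos hInt]
        refine ⟨?_, fun k h => h, ?_⟩
        · rw [if_neg (show ¬(i = 0 ∨ path[i-1]? ≠ some path[i]) from fun h =>
            h.elim (fun h0 => absurd hw.1 (by omega)) (fun hne => hne hw.2))]
        · intro path' cell' hs' hc'
          cases hs'
          rw [hcell] at hc'; cases hc'
          exact hc
      · -- real visit: both sides perform the same grouping step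
        have hInt : ¬ (0 < (i : Int) ∧ PySem.List.pyGet? path ((i : Int) - 1) = some path[i]) := by
          intro h
          apply hw
          refine ⟨by exact_mod_cast h.1, ?_⟩
          have h1 : 0 < i := by exact_mod_cast h.1
          rw [show (i : Int) - 1 = ((i - 1 : Nat) : Int) by omega, PySem.List.pyGet?_natCast] at h
          exact h.2
        have hcond : i = 0 ∨ path[i-1]? ≠ some path[i] := by
          by_cases h0 : i = 0
          · exact Or.inl h0
          · exact Or.inr fun h => hw ⟨Nat.pos_of_ne_zero h0, h⟩
        rw [if_pos hcond]
        unfold pvStep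
        simp only
        cases hl : loc.get? (pvKey path[i]) with
        | some lst =>
          simp only [if_neg hInt]
          refine ⟨by trivial, ?_, ?_⟩
          · intro k h
            rw [PySem.Dict.contains_insert]
            simp [h]
          · intro path' cell' hs' hc'
            cases hs'
            rw [hcell] at hc'; cases hc'
            exact PySem.Dict.contains_insert_self _ _ _
        | none =>
          refine ⟨rfl, ?_, ?_⟩
          · intro k h
            show (loc.insert (pvKey path[i]) [(a : Int)]).contains k = true
            rw [PySem.Dict.contains_insert]
            simp [h]
          · intro path' cell' hs' hc'
            cases hs'
            rw [hcell] at hc'; cases hc'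
            exact PySem.Dict.contains_insert_self _ _ _
    · rw [if_pos (by exact_mod_cast not_lt.mp hlen)]
      rw [List.getElem?_eq_none (by omega)]
      exact ⟨rfl, fun k h => h, fun path' cell' hs' hc' => by
        cases hs'
        rw [List.getElem?_eq_none (by omega)] at hc'; cases hc'⟩

lemma innerA (s : List (List (Int × Int))) (i : Nat) : ∀ (as : List Nat) (loc : PySem.Dict String (List Int)),
    pvInv s i loc →
    (as.foldl (pvA1 s i) loc = (as.filterMap (fun a => pvRec s i a)).foldl pvStep loc)
    ∧ (∀ k, loc.contains k = true → (as.foldl (pvA1 s i) loc).contains k = true)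
    ∧ (∀ a ∈ as, ∀ (path : List (Int × Int)) (cell : Int × Int), s[a]? = some path →
        path[i]? = some cell → (as.foldl (pvA1 s i) loc).contains (pvKey cell) = true) := by
  intro as
  induction as with
  | nil =>
    intro loc _
    exact ⟨rfl, fun k h => h, fun a ha => absurd ha (List.not_mem_nil)⟩
  | cons a t ih =>
    intro loc hInv
    obtain ⟨heq, hmono, hthird⟩ := stepA s i a loc hInv
    have hInv' : pvInv s i (pvA1 s i loc a) := fun a' j p c hj hs hp =>
      hmono _ (hInv a' j p c hj hs hp)
    obtain ⟨ieq, imono, ithird⟩ := ih (pvA1 s i loc a) hInv'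
    refine ⟨?_, ?_, ?_⟩
    · rw [List.foldl_cons, ieq, List.filterMap_cons]
      cases hr : pvRec s i a with
      | none =>
        simp only [hr] at heq
        rw [heq]
      | some r =>
        simp only [hr] at heq
        rw [heq, List.foldl_cons]
    · intro k h
      exact imono k (hmono k h)
    · intro a' ha' path cell hs hp
      rcases List.mem_cons.mp ha' with h | h
      · subst h
        exact imono _ (hthird path cell hs hp)
      · exact ithird a' h path cell hs hp

lemma outerA (s : List (List (Int × Int))) : ∀ (m : Nat),
    ((List.range m).foldl (fun loc i => (List.range s.length).foldl (pvA1 s i) loc) PySem.Dict.empty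
      = (pvTM s m).foldl pvStep PySem.Dict.empty)
    ∧ pvInv s m ((List.range m).foldl (fun loc i => (List.range s.length).foldl (pvA1 s i) loc) PySem.Dict.empty) := by
  intro m
  induction m with
  | zero => exact ⟨rfl, fun a j p c hj => absurd hj (Nat.not_lt_zero j)⟩
  | succ m ih =>
    obtain ⟨ieq, iInv⟩ := ih
    obtain ⟨req, rmono, rthird⟩ := innerA s m (List.range s.length) _ iInv
    have hfold : (List.range (m+1)).foldl (fun loc i => (List.range s.length).foldl (pvA1 s i) loc) PySem.Dict.empty
        = (List.range s.length).foldl (pvA1 s m)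
            ((List.range m).foldl (fun loc i => (List.range s.length).foldl (pvA1 s i) loc) PySem.Dict.empty) := by
      rw [List.range_succ, List.foldl_append, List.foldl_cons, List.foldl_nil]
    constructor
    · rw [hfold, req, ieq]
      unfold pvTM
      rw [List.range_succ, List.flatMap_append, List.foldl_append, List.flatMap_cons, List.flatMap_nil, List.append_nil]
    · intro a j path cell hj hs hp
      rw [hfold]
      rcases Nat.lt_or_ge j m with hjm | hjm
      · exact rmono _ (iInv a j path cell hjm hs hp)
      · have hjeq : j = m := by omega
        subst hjeq
        have ha : a < s.length := by
          by_contra hcon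
          rw [List.getElem?_eq_none (by omega)] at hs
          cases hs
        exact rthird a (List.mem_range.mpr ha) path cell hs hp

theorem A_eq_group (s : List (List (Int × Int))) :
    preprocess_orders s = ((pvTM s (pvMax s)).foldl pvStep PySem.Dict.empty).items := by
  unfold preprocess_orders
  simp only [pvMax_cast', PySem.List.pyRange_zero_natCast, List.foldl_map]
  exact congrArg PySem.Dict.items (outerA s (pvMax s)).1

-- ===== B-side: the built record list is the agent-major list =====

lemma filterMap_eq_map_filter {α β : Type} (p : α → Prop) [DecidablePred p] (f : α → β)
    (g : α → Option β) (l : List α) (h : ∀ x ∈ l, g x = if p x then some (f x) else none) :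
    l.filterMap g = (l.filter (fun x => decide (p x))).map f := by
  induction l with
  | nil => rfl
  | cons x t ih =>
    rw [List.filterMap_cons, List.filter_cons, h x List.mem_cons_self]
    by_cases hp : p x
    · simp [hp, ih (fun y hy => h y (List.mem_cons_of_mem _ hy))]
    · simp [hp, ih (fun y hy => h y (List.mem_cons_of_mem _ hy))]

lemma B_inner (path : List (Int × Int)) (aI : Int) (acc : List (Int × Int × String)) :
    (PySem.List.enumerate path).foldl (fun recs ic =>
       if ic.1 = 0 ∨ PySem.List.pyGet? path (ic.1 - 1) ≠ some ic.2 then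
         recs ++ [(ic.1, aI, pvKey ic.2)] else recs) acc
    = acc ++ (List.range path.length).filterMap (pvRecP path aI) := by
  rw [PySem.List.enumerate_eq_map_pyRange path (0,0)]
  have hr : PySem.List.pyRange 0 (PySem.List.len path) 1 = (List.range path.length).map (fun k : Nat => (k : Int)) := by
    rw [PySem.List.len_eq]; exact PySem.List.pyRange_zero_natCast path.length
  rw [hr]
  simp only [List.foldl_map]
  have hfa := PySem.List.foldl_append_ite (α := Nat) (β := Int × Int × String)
      (fun k : Nat => (k : Int) = 0 ∨ PySem.List.pyGet? path ((k : Int) - 1) ≠ some (PySem.List.pyGetD path (k : Int) (0,0)))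
      (fun k : Nat => ((k : Int), aI, pvKey (PySem.List.pyGetD path (k : Int) (0,0))))
      (List.range path.length) acc
  rw [hfa]
  congr 1
  rw [filterMap_eq_map_filter
      (fun k : Nat => (k : Int) = 0 ∨ PySem.List.pyGet? path ((k : Int) - 1) ≠ some (PySem.List.pyGetD path (k : Int) (0,0)))
      (fun k : Nat => ((k : Int), aI, pvKey (PySem.List.pyGetD path (k : Int) (0,0))))
      (pvRecP path aI) (List.range path.length) ?_]
  intro k hk
  have hk' : k < path.length := List.mem_range.mp hk
  obtain ⟨cell, hc⟩ : ∃ c, path[k]? = some c := ⟨path[k], List.getElem?_eq_getElem hk'⟩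
  have hgd : PySem.List.pyGetD path (k : Int) (0,0) = cell := by
    rw [PySem.List.pyGetD_natCast, List.getD_eq_getElem?_getD, hc]; rfl
  unfold pvRecP
  simp only [hc]
  by_cases h0 : k = 0
  · subst h0; simp only [Nat.cast_zero] at hgd; simp [hgd]
  · have hcast : (k : Int) - 1 = ((k - 1 : Nat) : Int) := by omega
    simp only [hgd, hcast, PySem.List.pyGet?_natCast]
    simp [h0]

lemma trim (path : List (Int × Int)) (aI : Int) (m : Nat) (h : path.length ≤ m) :
    (List.range m).filterMap (pvRecP path aI) = (List.range path.length).filterMap (pvRecP path aI) := by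
  conv_lhs => rw [show m = path.length + (m - path.length) by omega]
  rw [List.range_add, List.filterMap_append, List.filterMap_map]
  have : ∀ x ∈ List.range (m - path.length), (pvRecP path aI ∘ (fun k => path.length + k)) x = none := by
    intro x _
    simp only [Function.comp]
    unfold pvRecP
    rw [List.getElem?_eq_none (by omega)]
  rw [List.filterMap_eq_nil_iff.mpr this, List.append_nil]

theorem B_records (s : List (List (Int × Int))) :
    ((PySem.List.enumerate s).foldl (fun recs ap =>
      (PySem.List.enumerate ap.2).foldl (fun recs ic =>
        if ic.1 = 0 ∨ PySem.List.pyGet? ap.2 (ic.1 - 1) ≠ some ic.2 then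
          recs ++ [(ic.1, ap.1, pvKey ic.2)]
        else recs) recs) ([] : List (Int × Int × String)))
      = pvAM s (pvMax s) := by
  rw [PySem.List.foldl_congr_mem (PySem.List.enumerate s) _
      (fun recs ap => recs ++ (List.range ap.2.length).filterMap (pvRecP ap.2 ap.1)) []
      (fun acc ap _ => B_inner ap.2 ap.1 acc)]
  rw [PySem.List.foldl_append_eq_flatMap]
  rw [PySem.List.enumerate_eq_map_pyRange s []]
  have hr : PySem.List.pyRange 0 (PySem.List.len s) 1 = (List.range s.length).map (fun k : Nat => (k : Int)) := by
    rw [PySem.List.len_eq]; exact PySem.List.pyRange_zero_natCast s.length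
  rw [hr, List.map_map, List.flatMap_map, List.nil_append]
  unfold pvAM
  apply List.flatMap_congr
  intro a ha
  have hlt := List.mem_range.mp ha
  have hget : PySem.List.pyGetD s (a : Int) [] = s[a] := by
    rw [PySem.List.pyGetD_natCast, List.getD_eq_getElem?_getD, List.getElem?_eq_getElem hlt]; rfl
  have hfun : ∀ i, pvRec s i a = pvRecP s[a] (a : Int) i := by
    intro i; unfold pvRec; rw [List.getElem?_eq_getElem hlt]
  conv_rhs => rw [show (fun i => pvRec s i a) = pvRecP s[a] (a : Int) from funext hfun]
  rw [trim _ _ _ (pvMax_le s s[a] (s.getElem_mem hlt))]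
  simp only [Function.comp_apply, hget]

-- ===== permutation and sortedness =====

theorem TM_perm_AM (s : List (List (Int × Int))) (m : Nat) : (pvTM s m).Perm (pvAM s m) := by
  apply Multiset.coe_eq_coe.mp
  unfold pvTM pvAM
  simp only [List.filterMap_eq_flatMap_toList]
  simp only [← Multiset.coe_bind]
  rw [Multiset.bind_bind]

theorem TM_pairwise (s : List (List (Int × Int))) (m : Nat) :
    (pvTM s m).Pairwise (fun r r' => r.1 * (s.length : Int) + r.2.1 < r'.1 * (s.length : Int) + r'.2.1) := by
  unfold pvTM
  rw [List.pairwise_flatMap]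
  constructor
  · intro i _
    rw [List.pairwise_filterMap]
    apply List.Pairwise.imp ?_ (List.pairwise_lt_range)
    intro a a' hlt r hr r' hr'
    obtain ⟨h1, h2⟩ := pvRec_fields hr
    obtain ⟨h1', h2'⟩ := pvRec_fields hr'
    rw [h1, h2, h1', h2']
    have : (a : Int) < (a' : Int) := by exact_mod_cast hlt
    omega
  · apply List.Pairwise.imp ?_ (List.pairwise_lt_range)
    intro i i' hlt r hr r' hr'
    obtain ⟨a, ha, hra⟩ := List.mem_filterMap.mp hr
    obtain ⟨a', _, hra'⟩ := List.mem_filterMap.mp hr'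
    obtain ⟨h1, h2⟩ := pvRec_fields hra
    obtain ⟨h1', h2'⟩ := pvRec_fields hra'
    rw [h1, h2, h1', h2']
    have han : a < s.length := List.mem_range.mp ha
    have h1 : ((i : Int) + 1) * (s.length : Int) ≤ (i' : Int) * (s.length : Int) := by
      apply mul_le_mul_of_nonneg_right _ (by positivity)
      exact_mod_cast hlt
    have : (a : Int) < (s.length : Int) := by exact_mod_cast han
    have : (0 : Int) ≤ (a' : Int) := by positivity
    nlinarith

-- ===== VERDICT (by name: the statement is the Claim_ definition above) =====
theorem preprocess_orders_spec : Claim_equal_preprocess_orders := by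
  intro s _
  show preprocess_orders s = preprocess_orders_alt s
  rw [A_eq_group]
  simp only [preprocess_orders_alt]
  rw [B_records, PySem.List.sorted_eq_of_perm_of_pairwise_lt _ (pvTM s (pvMax s)) _
    (TM_perm_AM s (pvMax s)) (TM_pairwise s (pvMax s))]
  rfl
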